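-- pv_equiv track=rewrite | github.com/ricardofitas/AoC-2025 | Day 7.1/day7_1_qiskit.py | solve_classical
-- ===== SOURCE A (Python) =====
-- def solve_classical(text: str) -> int:
--     lines = text.splitlines()
--     if not lines:
--         return 0
--
--     grid = [list(line) for line in lines]
--     h = len(grid)
--     w = max(len(row) for row in grid)
--
--     # pad rows to same width
--     for r in range(h):
--         if len(grid[r]) < w:
--             grid[r] += [" "] * (w - len(grid[r]))
--
--     # locate S
--     start = None
--     for r in range(h):
--         for c in range(w):
--             if grid[r][c] == "S":
--                 start = (r, c)
--                 break
--         if start is not None: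
--             break
--     if start is None:
--         return 0
--
--     sr, sc = start
--     from collections import deque
--
--     visited = [[False] * w for _ in range(h)]
--     q = deque()
--     q.append((sr, sc))
--
--     splits = 0
--
--     while q:
--         r, c = q.popleft()
--         nr = r + 1
--         if nr >= h:
--             continue
--         nc = c
--
--         if visited[nr][nc]:
--             continue
--         visited[nr][nc] = True
--
--         ch = grid[nr][nc]
--         if ch == "^":
--             splits += 1
--             if nc > 0:
--                 q.append((nr, nc - 1))
--             if nc + 1 < w:
--                 q.append((nr, nc + 1))
--         else:
--             q.append((nr, nc))
--
--     return splits
-- ===== SOURCE B (Python) =====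
-- def solve_classical(text: str) -> int:
--     lines = text.splitlines()
--     if not lines:
--         return 0
--     w = max(len(line) for line in lines)
--
--     # locate S (first row containing it, first column in that row)
--     start = None
--     for r, line in enumerate(lines):
--         c = line.find("S")
--         if c != -1:
--             start = (r, c)
--             break
--     if start is None:
--         return 0
--     sr, sc = start
--
--     def at(row, c):
--         return row[c] if c < len(row) else " "
--
--     # dense occupancy DP: active[c] says a beam enters column c at the current row
--     splits = 0
--     active = [c == sc for c in range(w)]
--     for row in lines[sr + 1:]:
--         splits += len([c for c in range(w) if active[c] and at(row, c) == "^"])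
--         active = [
--             (active[c] and at(row, c) != "^")
--             or (c + 1 < w and active[c + 1] and at(row, c + 1) == "^")
--             or (c >= 1 and active[c - 1] and at(row, c - 1) == "^")
--             for c in range(w)
--         ]
--     return splits
-- ===== Notes on version B (the rewrite author's own statement) =====
-- stated objective: alternative
-- what changed: Replaces the deque BFS over a padded grid copy with a 2D visited array by a dense dynamic program: one boolean occupancy vector of width w per row (active[c] = a beam enters column c), updated row by row with a local stencil (beam continues straight, or a splitter in the adjacent column feeds it), counting splitter hits directly on the vector, so there is no queue, no visited grid and no padded grid copy.
import Mathlib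
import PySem

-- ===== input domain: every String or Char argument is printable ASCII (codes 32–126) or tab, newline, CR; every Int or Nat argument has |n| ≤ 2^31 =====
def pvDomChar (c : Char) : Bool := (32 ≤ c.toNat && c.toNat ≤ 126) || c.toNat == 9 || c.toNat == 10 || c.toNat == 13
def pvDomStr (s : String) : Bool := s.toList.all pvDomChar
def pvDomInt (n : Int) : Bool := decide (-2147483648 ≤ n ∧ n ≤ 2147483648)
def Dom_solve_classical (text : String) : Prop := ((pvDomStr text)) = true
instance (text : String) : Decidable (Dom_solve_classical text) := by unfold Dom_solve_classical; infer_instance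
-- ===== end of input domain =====

-- B replaces A's deque BFS (padded grid copy + 2D visited array) by a dense dynamic program:
-- one boolean occupancy vector per row, updated by a local stencil (alternative; return value only).

-- ===== PORT A =====

-- the nested 'for r … for c …' scan for 'S' (first hit, row-major)
def pvFindS : List (List Char) → Nat → Option (Nat × Nat)
  | [], _ => none
  | row :: rest, r =>
    match row.findIdx? (· = 'S') with
    | some c => some (r, c)
    | none => pvFindS rest (r + 1)

-- the 'while q' loop over the deque; fuel only makes the recursion structural (never exhausted on A's runs)
def pvBfsA (grid : List (List Char)) (h w : Nat) :
    Nat → List (Nat × Nat) → List (List Bool) → Int → Int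
  | 0, _, _, splits => splits
  | _ + 1, [], _, splits => splits
  | fuel + 1, (r, c) :: rest, visited, splits =>
    let nr := r + 1
    if h ≤ nr then pvBfsA grid h w fuel rest visited splits
    else if (visited.getD nr []).getD c false then pvBfsA grid h w fuel rest visited splits
    else
      let visited' := visited.modify nr (fun vrow => vrow.set c true)
      let ch := (grid.getD nr []).getD c ' '
      if ch = '^' then
        pvBfsA grid h w fuel
          (rest ++ (if 0 < c then [(nr, c - 1)] else []) ++ (if c + 1 < w then [(nr, c + 1)] else []))
          visited' (splits + 1)
      else
        pvBfsA grid h w fuel (rest ++ [(nr, c)]) visited' splits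

def solve_classical (text : String) : Int :=
  let lines := PySem.Str.splitlines text
  if lines = [] then 0
  else
    let grid0 := lines.map String.toList
    let h := grid0.length
    let w := (PySem.List.max? (grid0.map List.length) (fun x => x)).getD 0
    let grid := grid0.map (fun row => row ++ List.replicate (w - row.length) ' ')
    match pvFindS grid 0 with
    | none => 0
    | some (sr, sc) =>
      let visited := List.replicate h (List.replicate w false)
      pvBfsA grid h w (2 * h * w + 1) [(sr, sc)] visited 0

-- ===== PORT B =====

-- Source B's 'at(row, c)': row[c] if c < len(row) else " " (index always in range when taken)
def pvAt (row : List Char) (c : Nat) : Char :=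
  if c < row.length then row.getD c ' ' else ' '

-- 'for r, line in enumerate(lines): c = line.find("S")' first-hit scan
def pvFindSAlt : List String → Nat → Option (Nat × Nat)
  | [], _ => none
  | line :: rest, r =>
    match line.toList.findIdx? (· = 'S') with
    | some c => some (r, c)
    | none => pvFindSAlt rest (r + 1)

-- body of Source B's 'for row in lines[sr+1:]' loop: state = (splits, active);
-- active indexing active[c], active[c+1], active[c-1] is always in range in Source B, so getD is exact
def pvDenseRow (w : Nat) (st : Int × List Bool) (rowS : String) : Int × List Bool :=
  let row := rowS.toList
  let active := st.2
  let splits := st.1 + (((List.range w).filter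
      (fun c => active.getD c false && (pvAt row c == '^'))).length : Int)
  let nxt := (List.range w).map (fun c =>
      (active.getD c false && !(pvAt row c == '^'))
      || (decide (c + 1 < w) && active.getD (c + 1) false && (pvAt row (c + 1) == '^'))
      || (decide (1 ≤ c) && active.getD (c - 1) false && (pvAt row (c - 1) == '^')))
  (splits, nxt)

def solve_classical_alt (text : String) : Int :=
  let lines := PySem.Str.splitlines text
  if lines = [] then 0
  else
    let w := (PySem.List.max? (lines.map (fun l => l.toList.length)) (fun x => x)).getD 0
    match pvFindSAlt lines 0 with
    | none => 0
    | some (sr, sc) =>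
      ((lines.drop (sr + 1)).foldl (pvDenseRow w)
        (0, (List.range w).map (fun c => decide (c = sc)))).1

-- ===== PRECONDITION & SPEC =====
def Spec_solve_classical (text : String) (out : Int) : Prop := out = solve_classical_alt text
instance (text : String) (out : Int) : Decidable (Spec_solve_classical text out) := by unfold Spec_solve_classical; infer_instance

-- ===== CLAIM (what is proved, stated in full; the proofs are below) =====
def Claim_equal_solve_classical : Prop := ∀ (text : String), Dom_solve_classical text → Spec_solve_classical text (solve_classical text)

-- ===== LEMMAS AND PROOFS =====

-- proof-side sparse sweep (intermediate between A's BFS and B's dense DP):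
-- state of the inner per-column step = (done, splits, nxt)
def pvStepB (row : List Char) (w : Nat) (s : PySem.Set Nat × Int × List Nat) (c : Nat) :
    PySem.Set Nat × Int × List Nat :=
  if PySem.Set.contains s.1 c then s
  else if pvAt row c = '^' then
    (PySem.Set.add s.1 c, s.2.1 + 1,
      s.2.2 ++ (if 0 < c then [c - 1] else []) ++ (if c + 1 < w then [c + 1] else []))
  else
    (PySem.Set.add s.1 c, s.2.1, s.2.2 ++ [c])

-- one row of the sparse sweep: state = (splits, frontier)
def pvRowB (w : Nat) (row : List Char) (s : Int × List Nat) : Int × List Nat :=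
  let res := s.2.foldl (pvStepB row w) (PySem.Set.empty, s.1, [])
  (res.2.1, res.2.2)

-- the successor relation of one beam at column c entering the next row
def pvSucc (row : List Char) (w : Nat) (c x : Nat) : Prop :=
  if pvAt row c = '^' then (0 < c ∧ x = c - 1) ∨ (c + 1 < w ∧ x = c + 1) else x = c

lemma pvGetD_replicate_self {α : Type} (a : α) (k i : Nat) :
    (List.replicate k a).getD i a = a := by
  by_cases h : i < k
  · exact List.getD_replicate a h
  · rw [List.getD_eq_getElem?_getD, List.getElem?_eq_none (by simpa using by omega)]
    rfl

lemma pvNodup_length_le (l : List Nat) (w : Nat) (hn : l.Nodup) (hb : ∀ x ∈ l, x < w) :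
    l.length ≤ w := by
  have h1 : l.toFinset.card = l.length := List.toFinset_card_of_nodup hn
  have h2 : l.toFinset ⊆ Finset.range w := by
    intro x hx
    rw [List.mem_toFinset] at hx
    exact Finset.mem_range.mpr (hb x hx)
  calc l.length = l.toFinset.card := h1.symm
    _ ≤ (Finset.range w).card := Finset.card_le_card h2
    _ = w := Finset.card_range w

-- one pvStepB step keeps all frontier columns below w
lemma pvStepB_out_lt_step (row : List Char) (w : Nat) (st : PySem.Set Nat × Int × List Nat)
    (c : Nat) (hc : c < w) (hst : ∀ x ∈ st.2.2, x < w) :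
    ∀ x ∈ (pvStepB row w st c).2.2, x < w := by
  obtain ⟨d, s, n⟩ := st
  intro x hx
  simp only [pvStepB] at hx
  split_ifs at hx <;>
    simp only [List.append_nil, List.append_assoc, List.mem_append,
      List.mem_singleton] at hx <;>
    first
      | exact hst x hx
      | (rcases hx with hx | hx | hx
         · exact hst x hx
         · omega
         · omega)
      | (rcases hx with hx | hx
         · exact hst x hx
         · omega)

lemma pvStepB_out_lt (row : List Char) (w : Nat) :
    ∀ (cs : List Nat) (st : PySem.Set Nat × Int × List Nat),
      (∀ c ∈ cs, c < w) → (∀ x ∈ st.2.2, x < w) →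
      ∀ x ∈ (cs.foldl (pvStepB row w) st).2.2, x < w := by
  intro cs
  induction cs with
  | nil => intro st _ hst; simpa using hst
  | cons c cs ih =>
    intro st hcs hst
    simp only [List.foldl_cons]
    exact ih _ (fun x hx => hcs x (List.mem_cons_of_mem _ hx))
      (pvStepB_out_lt_step row w st c (hcs c List.mem_cons_self) hst)

-- the done set stays nodup and bounded
lemma pvStepB_done_step (row : List Char) (w : Nat) (st : PySem.Set Nat × Int × List Nat)
    (c : Nat) (hc : c < w) (hb : ∀ x ∈ st.1, x < w) (hn : st.1.Nodup) :
    (∀ x ∈ (pvStepB row w st c).1, x < w) ∧ (pvStepB row w st c).1.Nodup := by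
  obtain ⟨d, s, n⟩ := st
  simp only [pvStepB]
  split_ifs with h1 h2
  · exact ⟨hb, hn⟩
  all_goals
    refine ⟨?_, PySem.Set.nodup_add _ _ hn⟩
    intro x hx
    rw [PySem.Set.mem_add] at hx
    rcases hx with hx | hx
    · exact hb x hx
    · omega

lemma pvStepB_done (row : List Char) (w : Nat) :
    ∀ (cs : List Nat) (st : PySem.Set Nat × Int × List Nat),
      (∀ c ∈ cs, c < w) → (∀ x ∈ st.1, x < w) → st.1.Nodup →
      (∀ x ∈ (cs.foldl (pvStepB row w) st).1, x < w) ∧ (cs.foldl (pvStepB row w) st).1.Nodup := by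
  intro cs
  induction cs with
  | nil => intro st _ hb hn; exact ⟨hb, hn⟩
  | cons c cs ih =>
    intro st hcs hb hn
    simp only [List.foldl_cons]
    obtain ⟨hb', hn'⟩ := pvStepB_done_step row w st c (hcs c List.mem_cons_self) hb hn
    exact ih _ (fun x hx => hcs x (List.mem_cons_of_mem _ hx)) hb' hn'

-- at most two produced columns per newly seen column
lemma pvStepB_len_step (row : List Char) (w : Nat) (st : PySem.Set Nat × Int × List Nat) (c : Nat) :
    (pvStepB row w st c).2.2.length + 2 * st.1.length
      ≤ st.2.2.length + 2 * (pvStepB row w st c).1.length := by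
  obtain ⟨d, s, n⟩ := st
  simp only [pvStepB, PySem.Set.add]
  split_ifs <;> simp <;> omega

lemma pvStepB_len (row : List Char) (w : Nat) :
    ∀ (cs : List Nat) (st : PySem.Set Nat × Int × List Nat),
      (cs.foldl (pvStepB row w) st).2.2.length + 2 * st.1.length
        ≤ st.2.2.length + 2 * (cs.foldl (pvStepB row w) st).1.length := by
  intro cs
  induction cs with
  | nil => intro st; simp only [List.foldl_nil]; omega
  | cons c cs ih =>
    intro st
    simp only [List.foldl_cons]
    have h1 := ih (pvStepB row w st c)
    have h2 := pvStepB_len_step row w st c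
    omega

-- the nxt accumulator only ever appends
lemma pvStepB_nxt_append (row : List Char) (w : Nat) :
    ∀ (cs : List Nat) (done : PySem.Set Nat) (splits : Int) (nxt : List Nat),
      cs.foldl (pvStepB row w) (done, splits, nxt)
        = ((cs.foldl (pvStepB row w) (done, splits, [])).1,
           (cs.foldl (pvStepB row w) (done, splits, [])).2.1,
           nxt ++ (cs.foldl (pvStepB row w) (done, splits, [])).2.2) := by
  intro cs
  induction cs with
  | nil => intro done splits nxt; simp
  | cons c cs ih =>
    intro done splits nxt
    simp only [List.foldl_cons]
    by_cases h1 : PySem.Set.contains done c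
    · have e1 : pvStepB row w (done, splits, nxt) c = (done, splits, nxt) := by
        simp only [pvStepB, h1, if_true]
      have e2 : pvStepB row w (done, splits, []) c = (done, splits, []) := by
        simp only [pvStepB, h1, if_true]
      rw [e1, e2]
      exact ih done splits nxt
    · by_cases h2 : pvAt row c = '^'
      · have e1 : pvStepB row w (done, splits, nxt) c
            = (PySem.Set.add done c, splits + 1,
               nxt ++ (if 0 < c then [c - 1] else []) ++ (if c + 1 < w then [c + 1] else [])) := by
          simp only [pvStepB, h1, if_false, Bool.false_eq_true, if_pos h2]
        have e2 : pvStepB row w (done, splits, []) c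
            = (PySem.Set.add done c, splits + 1,
               ([] : List Nat) ++ (if 0 < c then [c - 1] else []) ++ (if c + 1 < w then [c + 1] else [])) := by
          simp only [pvStepB, h1, if_false, Bool.false_eq_true, if_pos h2]
        have i1 := ih (PySem.Set.add done c) (splits + 1)
          ((nxt ++ (if 0 < c then [c - 1] else [])) ++ (if c + 1 < w then [c + 1] else []))
        have i2 := ih (PySem.Set.add done c) (splits + 1)
          ((([] : List Nat) ++ (if 0 < c then [c - 1] else [])) ++ (if c + 1 < w then [c + 1] else []))
        rw [e1, e2, i1, i2]
        simp [List.append_assoc]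
      · have e1 : pvStepB row w (done, splits, nxt) c
            = (PySem.Set.add done c, splits, nxt ++ [c]) := by
          simp only [pvStepB, h1, if_false, Bool.false_eq_true, if_neg h2]
        have e2 : pvStepB row w (done, splits, []) c
            = (PySem.Set.add done c, splits, ([] : List Nat) ++ [c]) := by
          simp only [pvStepB, h1, if_false, Bool.false_eq_true, if_neg h2]
        have i1 := ih (PySem.Set.add done c) splits (nxt ++ [c])
        have i2 := ih (PySem.Set.add done c) splits (([] : List Nat) ++ [c])
        rw [e1, e2, i1, i2]
        simp [List.append_assoc]

-- once every queue entry points below the grid, the BFS just drains and returns splits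
lemma pvBfsA_drain (grid : List (List Char)) (h w : Nat) :
    ∀ (fuel : Nat) (q : List (Nat × Nat)) (visited : List (List Bool)) (splits : Int),
      (∀ p ∈ q, h ≤ p.1 + 1) →
      pvBfsA grid h w fuel q visited splits = splits := by
  intro fuel
  induction fuel with
  | zero => intro q visited splits _; rfl
  | succ fuel ih =>
    intro q visited splits hq
    match q with
    | [] => rfl
    | (r, c) :: rest =>
      have hr : h ≤ r + 1 := hq (r, c) List.mem_cons_self
      rw [pvBfsA]
      simp only [hr, if_true]
      exact ih rest visited splits (fun p hp => hq p (List.mem_cons_of_mem _ hp))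

-- PHASE: consuming all row-r queue entries is exactly one pvRowB inner fold
lemma pvPhase (grid : List (List Char)) (h w : Nat) (r : Nat) (row : List Char)
    (hrow : ∀ c, (grid.getD (r + 1) []).getD c ' ' = pvAt row c)
    (hr : r + 1 < h) :
    ∀ (cs : List Nat) (tail : List (Nat × Nat)) (visited : List (List Bool))
      (done : PySem.Set Nat) (splits : Int) (fuel : Nat),
      r + 1 < visited.length →
      (visited.getD (r + 1) []).length = w →
      (∀ x, (visited.getD (r + 1) []).getD x false = decide (x ∈ done)) →
      (∀ c ∈ cs, c < w) →
      ∃ visited',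
        pvBfsA grid h w (cs.length + fuel) (cs.map (fun c => (r, c)) ++ tail) visited splits
          = pvBfsA grid h w fuel
              (tail ++ (cs.foldl (pvStepB row w) (done, splits, [])).2.2.map (fun c => (r + 1, c)))
              visited' (cs.foldl (pvStepB row w) (done, splits, [])).2.1
        ∧ visited'.length = visited.length
        ∧ (∀ j, j ≠ r + 1 → visited'.getD j [] = visited.getD j []) := by
  intro cs
  induction cs with
  | nil =>
    intro tail visited done splits fuel _ _ _ _
    exact ⟨visited, by simp, rfl, fun _ _ => rfl⟩
  | cons c cs ih =>
    intro tail visited done splits fuel hlt hlen hrel hcs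
    have hc : c < w := hcs c List.mem_cons_self
    have hcs' : ∀ x ∈ cs, x < w := fun x hx => hcs x (List.mem_cons_of_mem _ hx)
    have hfuel : (c :: cs).length + fuel = (cs.length + fuel) + 1 := by simp; omega
    rw [hfuel]
    simp only [List.map_cons, List.cons_append]
    rw [pvBfsA]
    simp only [if_neg (by omega : ¬ h ≤ r + 1)]
    rw [hrel c]
    by_cases hmem : c ∈ done
    · -- seen already: A skips, the sparse step is the identity
      simp only [hmem, decide_true, if_true]
      have hcy : PySem.Set.contains done c = true := List.contains_iff_mem.mpr hmem
      have hstep : pvStepB row w (done, splits, []) c = (done, splits, []) := by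
        simp only [pvStepB, hcy, if_true]
      simp only [List.foldl_cons, hstep]
      exact ih tail visited done splits fuel hlt hlen hrel hcs'
    · simp only [hmem, decide_false, Bool.false_eq_true, if_false]
      -- A marks visited[r+1][c]; the sweep adds c to done
      have hnc : PySem.Set.contains done c = false := by
        simp [PySem.Set.contains, hmem]
      have hadd : PySem.Set.add done c = done ++ [c] := by
        simp [PySem.Set.add, hmem]
      set visited₀ := visited.modify (r + 1) (fun vrow => vrow.set c true) with hv₀
      have hget₀ : visited₀.getD (r + 1) [] = (visited.getD (r + 1) []).set c true := by
        rw [hv₀, List.getD_eq_getElem?_getD, List.getD_eq_getElem?_getD, List.getElem?_modify]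
        rw [List.getElem?_eq_some_iff.mpr ⟨hlt, rfl⟩]
        simp
      have hlt₀ : r + 1 < visited₀.length := by
        rw [hv₀, List.length_modify]; exact hlt
      have hlen₀ : (visited₀.getD (r + 1) []).length = w := by
        rw [hget₀, List.length_set]; exact hlen
      have hrel₀ : ∀ x, (visited₀.getD (r + 1) []).getD x false = decide (x ∈ done ++ [c]) := by
        intro x
        rw [hget₀, List.getD_eq_getElem?_getD, List.getElem?_set]
        by_cases hx : c = x
        · subst hx
          have hcl : c < (visited.getD (r + 1) []).length := by omega
          rw [if_pos rfl, if_pos hcl]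
          simp
        · rw [if_neg hx, ← List.getD_eq_getElem?_getD, hrel x]
          simp only [List.mem_append, List.mem_singleton, decide_eq_decide]
          constructor
          · exact Or.inl
          · rintro (hh | hh)
            · exact hh
            · exact absurd hh.symm hx
      have hsame₀ : ∀ j, j ≠ r + 1 → visited₀.getD j [] = visited.getD j [] := by
        intro j hj
        have hne : ¬ (r + 1 = j) := fun hh => hj hh.symm
        rw [hv₀, List.getD_eq_getElem?_getD, List.getD_eq_getElem?_getD, List.getElem?_modify]
        cases visited[j]? <;> simp [hne]
      rw [hrow c]
      by_cases hhat : pvAt row c = '^'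
      · -- split: two new beams
        rw [if_pos hhat]
        have hstep : pvStepB row w (done, splits, []) c
            = (done ++ [c], splits + 1,
               ([] : List Nat) ++ (if 0 < c then [c - 1] else []) ++ (if c + 1 < w then [c + 1] else [])) := by
          simp only [pvStepB, hnc, Bool.false_eq_true, if_false, if_pos hhat, hadd]
        have hq : ((cs.map (fun c => (r, c)) ++ tail)
              ++ (if 0 < c then [(r + 1, c - 1)] else []) ++ (if c + 1 < w then [(r + 1, c + 1)] else []))
            = cs.map (fun c => (r, c))
              ++ (tail ++ ((if 0 < c then [c - 1] else []) ++ (if c + 1 < w then [c + 1] else [])).map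
                    (fun c => (r + 1, c))) := by
          split_ifs <;> simp
        rw [hq]
        obtain ⟨visited', heq, hlen', hsame'⟩ :=
          ih (tail ++ ((if 0 < c then [c - 1] else []) ++ (if c + 1 < w then [c + 1] else [])).map
                (fun c => (r + 1, c)))
             visited₀ (done ++ [c]) (splits + 1) fuel hlt₀ hlen₀ hrel₀ hcs'
        refine ⟨visited', ?_, by rw [hlen', hv₀, List.length_modify],
          fun j hj => by rw [hsame' j hj, hsame₀ j hj]⟩
        rw [heq]
        rw [List.foldl_cons, hstep,
          pvStepB_nxt_append row w cs (done ++ [c]) (splits + 1)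
            ((([] : List Nat) ++ (if 0 < c then [c - 1] else [])) ++ (if c + 1 < w then [c + 1] else []))]
        simp [List.append_assoc]
      · -- straight down: one beam
        rw [if_neg hhat]
        have hstep : pvStepB row w (done, splits, []) c
            = (done ++ [c], splits, ([] : List Nat) ++ [c]) := by
          simp only [pvStepB, hnc, Bool.false_eq_true, if_false, if_neg hhat, hadd]
        have hq : ((cs.map (fun c => (r, c)) ++ tail) ++ [(r + 1, c)])
            = cs.map (fun c => (r, c)) ++ (tail ++ ([c].map (fun c => (r + 1, c)))) := by
          simp
        rw [hq]
        obtain ⟨visited', heq, hlen', hsame'⟩ :=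
          ih (tail ++ ([c].map (fun c => (r + 1, c)))) visited₀ (done ++ [c]) splits fuel
            hlt₀ hlen₀ hrel₀ hcs'
        refine ⟨visited', ?_, by rw [hlen', hv₀, List.length_modify],
          fun j hj => by rw [hsame' j hj, hsame₀ j hj]⟩
        rw [heq]
        rw [List.foldl_cons, hstep,
          pvStepB_nxt_append row w cs (done ++ [c]) splits (([] : List Nat) ++ [c])]
        simp [List.append_assoc]

-- DRIVER: the whole BFS, row by row, equals the sparse fold over the remaining rows
lemma pvDriver (lines : List String) (h w : Nat) (grid : List (List Char))
    (hh : h = lines.length)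
    (hgrid : grid = lines.map (fun l => l.toList ++ List.replicate (w - l.toList.length) ' ')) :
    ∀ (n r : Nat) (frontier : List Nat) (visited : List (List Bool)) (splits : Int) (fuel : Nat),
      r + 1 + n = h →
      visited.length = h →
      (∀ j, r + 1 ≤ j → j < h → visited.getD j [] = List.replicate w false) →
      (∀ c ∈ frontier, c < w) →
      frontier.length + 2 * w * n ≤ fuel →
      pvBfsA grid h w fuel (frontier.map (fun c => (r, c))) visited splits
        = ((List.range' (r + 1) n).foldl (fun s j => pvRowB w (lines.getD j "").toList s)
            (splits, frontier)).1 := by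
  intro n
  induction n with
  | zero =>
    intro r frontier visited splits fuel hn _ _ _ _
    simp only [List.range', List.foldl_nil]
    exact pvBfsA_drain grid h w fuel _ visited splits
      (by intro p hp; simp only [List.mem_map] at hp; obtain ⟨c, _, rfl⟩ := hp; omega)
  | succ n ih =>
    intro r frontier visited splits fuel hn hvl hvrows hfr hfuel
    have hr1 : r + 1 < h := by omega
    set row := (lines.getD (r + 1) "").toList with hrowdef
    have hrowlem : ∀ c, (grid.getD (r + 1) []).getD c ' ' = pvAt row c := by
      intro c
      have hidx : r + 1 < lines.length := by omega
      have hg : grid.getD (r + 1) [] = row ++ List.replicate (w - row.length) ' ' := by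
        rw [hgrid, List.getD_eq_getElem?_getD, List.getElem?_map,
          List.getElem?_eq_some_iff.mpr ⟨hidx, rfl⟩]
        simp [hrowdef, List.getD_eq_getElem?_getD, List.getElem?_eq_some_iff.mpr ⟨hidx, rfl⟩]
      rw [hg, pvAt]
      by_cases hcl : c < row.length
      · rw [List.getD_append _ _ _ _ hcl, if_pos hcl]
      · rw [List.getD_append_right _ _ _ _ (by omega), if_neg hcl]
        exact pvGetD_replicate_self ' ' _ _
    have hvrow : visited.getD (r + 1) [] = List.replicate w false :=
      hvrows (r + 1) (le_refl _) hr1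
    obtain ⟨visited', heq, hlen', hsame'⟩ :=
      pvPhase grid h w r row hrowlem hr1 frontier [] visited [] splits (fuel - frontier.length)
        (by omega) (by rw [hvrow]; simp)
        (by intro x; rw [hvrow]; simp) hfr
    rw [(by omega : fuel = frontier.length + (fuel - frontier.length))]
    rw [(by simp : frontier.map (fun c => (r, c)) = frontier.map (fun c => (r, c)) ++ ([] : List (Nat × Nat)))]
    rw [heq]
    set res := frontier.foldl (pvStepB row w) ([], splits, []) with hres
    -- bound on the produced frontier
    have hdone := pvStepB_done row w frontier ([], splits, []) hfr (by simp) List.nodup_nil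
    have hdlen : res.1.length ≤ w := pvNodup_length_le _ w hdone.2 hdone.1
    have hout : res.2.2.length ≤ 2 * w := by
      have hl := pvStepB_len row w frontier ([], splits, [])
      rw [← hres] at hl
      simp only [List.length_nil, Nat.mul_zero, Nat.add_zero, Nat.zero_add] at hl
      omega
    have houtlt : ∀ x ∈ res.2.2, x < w := pvStepB_out_lt row w frontier _ hfr (by simp)
    rw [List.range'_succ, List.foldl_cons]
    have hrowB : pvRowB w row (splits, frontier) = (res.2.1, res.2.2) := rfl
    rw [← hrowdef, hrowB]
    rw [List.nil_append]
    exact ih (r + 1) res.2.2 visited' res.2.1 (fuel - frontier.length)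
      (by omega) (by rw [hlen', hvl])
      (by intro j hj1 hj2; rw [hsame' j (by omega)]; exact hvrows j (by omega) hj2)
      houtlt
      (by have h3 : 2 * w * (n + 1) = 2 * w + 2 * w * n := by ring
          omega)

-- padding a row with spaces does not change where 'S' first occurs
lemma pvFindS_pad (w : Nat) :
    ∀ (ls : List String) (r : Nat),
      pvFindS (ls.map (fun l => l.toList ++ List.replicate (w - l.toList.length) ' ')) r
        = pvFindSAlt ls r := by
  intro ls
  induction ls with
  | nil => intro r; rfl
  | cons l rest ih =>
    intro r
    simp only [List.map_cons]
    rw [pvFindS, pvFindSAlt]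
    rw [List.findIdx?_append, List.findIdx?_replicate]
    simp only [show (((' ' : Char) = 'S') : Bool) = false by decide]
    simp only [Bool.false_eq_true, and_false, if_false, Option.map_none, Option.or_none]
    cases l.toList.findIdx? (· = 'S') with
    | some c => rfl
    | none => exact ih (r + 1)

lemma pvFindSAlt_bounds :
    ∀ (ls : List String) (r sr sc : Nat),
      pvFindSAlt ls r = some (sr, sc) →
      sr < r + ls.length ∧ ∃ l ∈ ls, sc < l.toList.length := by
  intro ls
  induction ls with
  | nil => intro r sr sc hfind; simp [pvFindSAlt] at hfind
  | cons l rest ih =>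
    intro r sr sc hfind
    rw [pvFindSAlt] at hfind
    cases hidx : l.toList.findIdx? (· = 'S') with
    | some c =>
      rw [hidx] at hfind
      simp only [Option.some.injEq, Prod.mk.injEq] at hfind
      obtain ⟨rfl, rfl⟩ := hfind
      refine ⟨by simp only [List.length_cons]; omega, l, List.mem_cons_self, ?_⟩
      exact (List.findIdx?_eq_some_iff_findIdx_eq.mp hidx).1
    | none =>
      rw [hidx] at hfind
      obtain ⟨h1, l', hl', h2⟩ := ih (r + 1) sr sc hfind
      exact ⟨by simp only [List.length_cons]; omega, l', List.mem_cons_of_mem _ hl', h2⟩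

-- characterisation of the sparse per-row fold: splits counts the distinct new '^' columns,
-- and the produced frontier is exactly the successor set
lemma pvFold_char (row : List Char) (w : Nat) :
    ∀ (cs done : List Nat) (s : Int) (n : List Nat),
      (cs.foldl (pvStepB row w) (done, s, n)).2.1
          = s + (((cs.toFinset \ done.toFinset).filter (fun c => pvAt row c = '^')).card : Int)
      ∧ ∀ x, x ∈ (cs.foldl (pvStepB row w) (done, s, n)).2.2 ↔
          x ∈ n ∨ ∃ c ∈ cs, c ∉ done ∧ pvSucc row w c x := by
  intro cs
  induction cs with
  | nil =>
    intro done s n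
    simp
  | cons c cs ih =>
    intro done s n
    simp only [List.foldl_cons]
    by_cases hmem : c ∈ done
    · have hcy : PySem.Set.contains done c = true := List.contains_iff_mem.mpr hmem
      have hstep : pvStepB row w (done, s, n) c = (done, s, n) := by
        simp only [pvStepB, hcy, if_true]
      rw [hstep]
      obtain ⟨h1, h2⟩ := ih done s n
      have hset : (c :: cs).toFinset \ done.toFinset = cs.toFinset \ done.toFinset := by
        ext x
        simp only [Finset.mem_sdiff, List.toFinset_cons, Finset.mem_insert, List.mem_toFinset]
        constructor
        · rintro ⟨rfl | hx, hnd⟩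
          · exact absurd hmem hnd
          · exact ⟨hx, hnd⟩
        · rintro ⟨hx, hnd⟩; exact ⟨Or.inr hx, hnd⟩
      constructor
      · rw [h1, hset]
      · intro x
        rw [h2 x]
        constructor
        · rintro (hx | ⟨c', hc', hnd, hs⟩)
          · exact Or.inl hx
          · exact Or.inr ⟨c', List.mem_cons_of_mem _ hc', hnd, hs⟩
        · rintro (hx | ⟨c', hc', hnd, hs⟩)
          · exact Or.inl hx
          · rcases List.mem_cons.mp hc' with rfl | hc'
            · exact absurd hmem hnd
            · exact Or.inr ⟨c', hc', hnd, hs⟩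
    · have hnc : PySem.Set.contains done c = false := by
        simp [PySem.Set.contains, hmem]
      have hadd : PySem.Set.add done c = done ++ [c] := by
        simp [PySem.Set.add, hmem]
      by_cases hhat : pvAt row c = '^'
      · have hstep : pvStepB row w (done, s, n) c
            = (done ++ [c], s + 1,
               n ++ (if 0 < c then [c - 1] else []) ++ (if c + 1 < w then [c + 1] else [])) := by
          simp only [pvStepB, hnc, Bool.false_eq_true, if_false, if_pos hhat, hadd]
        rw [hstep]
        obtain ⟨h1, h2⟩ := ih (done ++ [c]) (s + 1)
          (n ++ (if 0 < c then [c - 1] else []) ++ (if c + 1 < w then [c + 1] else []))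
        constructor
        · rw [h1]
          have hset : ((c :: cs).toFinset \ done.toFinset).filter (fun c => pvAt row c = '^')
              = insert c ((cs.toFinset \ (done ++ [c]).toFinset).filter
                  (fun c => pvAt row c = '^')) := by
            ext x
            simp only [Finset.mem_filter, Finset.mem_sdiff, Finset.mem_insert,
              List.toFinset_cons, List.toFinset_append, Finset.mem_union, List.mem_toFinset,
              List.mem_singleton]
            constructor
            · rintro ⟨⟨rfl | hx, hnd⟩, hh⟩
              · exact Or.inl rfl
              · by_cases hxc : x = c
                · exact Or.inl hxc
                · exact Or.inr ⟨⟨hx, by tauto⟩, hh⟩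
            · rintro (rfl | ⟨⟨hx, hnd⟩, hh⟩)
              · exact ⟨⟨Or.inl rfl, hmem⟩, hhat⟩
              · exact ⟨⟨Or.inr hx, fun hxd => hnd (Or.inl hxd)⟩, hh⟩
          rw [hset, Finset.card_insert_of_notMem (by simp)]
          push_cast
          ring
        · intro x
          rw [h2 x]
          have hsuccc : pvSucc row w c x ↔
              x ∈ (if 0 < c then [c - 1] else []) ++ (if c + 1 < w then [c + 1] else []) := by
            rw [pvSucc, if_pos hhat]
            split_ifs <;> simp <;> tauto
          have ho : x ∈ n ++ (if 0 < c then [c - 1] else []) ++ (if c + 1 < w then [c + 1] else [])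
              ↔ x ∈ n ∨ pvSucc row w c x := by
            rw [hsuccc]
            simp [List.mem_append, or_assoc]
          constructor
          · rintro (hx | ⟨c', hc', hnd, hs⟩)
            · rcases ho.mp hx with hx | hx
              · exact Or.inl hx
              · exact Or.inr ⟨c, List.mem_cons_self, hmem, hx⟩
            · refine Or.inr ⟨c', List.mem_cons_of_mem _ hc', fun hd => hnd (by simp [hd]), hs⟩
          · rintro (hx | ⟨c', hc', hnd, hs⟩)
            · exact Or.inl (ho.mpr (Or.inl hx))
            · by_cases hcc : c' = c
              · subst hcc
                exact Or.inl (ho.mpr (Or.inr hs))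
              · rcases List.mem_cons.mp hc' with rfl | hc'
                · exact absurd rfl hcc
                · exact Or.inr ⟨c', hc', by simp [hnd, hcc], hs⟩
      · have hstep : pvStepB row w (done, s, n) c = (done ++ [c], s, n ++ [c]) := by
          simp only [pvStepB, hnc, Bool.false_eq_true, if_false, if_neg hhat, hadd]
        rw [hstep]
        obtain ⟨h1, h2⟩ := ih (done ++ [c]) s (n ++ [c])
        constructor
        · rw [h1]
          have hset : ((c :: cs).toFinset \ done.toFinset).filter (fun c => pvAt row c = '^')
              = (cs.toFinset \ (done ++ [c]).toFinset).filter (fun c => pvAt row c = '^') := by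
            ext x
            simp only [Finset.mem_filter, Finset.mem_sdiff, List.toFinset_cons,
              Finset.mem_insert, List.toFinset_append, Finset.mem_union, List.mem_toFinset,
              List.mem_singleton]
            constructor
            · rintro ⟨⟨rfl | hx, hnd⟩, hh⟩
              · exact absurd hh hhat
              · refine ⟨⟨hx, ?_⟩, hh⟩
                rintro (hxd | rfl | h)
                · exact hnd hxd
                · exact hhat hh
                · simp at h
            · rintro ⟨⟨hx, hnd⟩, hh⟩
              exact ⟨⟨Or.inr hx, fun hxd => hnd (Or.inl hxd)⟩, hh⟩
          rw [hset]
        · intro x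
          rw [h2 x]
          have hsuccc : pvSucc row w c x ↔ x = c := by rw [pvSucc, if_neg hhat]
          constructor
          · rintro (hx | ⟨c', hc', hnd, hs⟩)
            · rcases List.mem_append.mp hx with hx | hx
              · exact Or.inl hx
              · exact Or.inr ⟨c, List.mem_cons_self, hmem, hsuccc.mpr (by simpa using hx)⟩
            · refine Or.inr ⟨c', List.mem_cons_of_mem _ hc', fun hd => hnd (by simp [hd]), hs⟩
          · rintro (hx | ⟨c', hc', hnd, hs⟩)
            · exact Or.inl (List.mem_append.mpr (Or.inl hx))
            · by_cases hcc : c' = c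
              · subst hcc
                exact Or.inl (List.mem_append.mpr (Or.inr (by simp [hsuccc.mp hs])))
              · rcases List.mem_cons.mp hc' with rfl | hc'
                · exact absurd rfl hcc
                · exact Or.inr ⟨c', hc', by simp [hnd, hcc], hs⟩

-- getD of a map over range
lemma pvGetD_map_range {α : Type} [Inhabited α] (f : Nat → α) (w c : Nat) (h : c < w) (d : α) :
    ((List.range w).map f).getD c d = f c := by
  rw [List.getD_eq_getElem?_getD, List.getElem?_map, List.getElem?_range h]
  rfl

-- range'-indexed fold = fold over the dropped suffix
lemma pvFoldl_range'_getD {α : Type} (f : α → String → α) (lines : List String) :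
    ∀ (n r : Nat) (a : α), r + n = lines.length →
      (List.range' r n).foldl (fun acc j => f acc (lines.getD j "")) a
        = ((lines.drop r).foldl f a) := by
  intro n
  induction n with
  | zero =>
    intro r a hr
    rw [List.drop_eq_nil_of_le (by omega)]
    rfl
  | succ n ih =>
    intro r a hr
    have hlt : r < lines.length := by omega
    rw [List.range'_succ, List.foldl_cons, List.drop_eq_getElem_cons hlt, List.foldl_cons,
      List.getD_eq_getElem lines "" hlt]
    exact ih (r + 1) _ (by omega)

-- BRIDGE: the sparse sweep and B's dense DP agree row by row
lemma pvSparseDense (w : Nat) :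
    ∀ (rows : List String) (fr : List Nat) (active : List Bool) (s : Int),
      (∀ c ∈ fr, c < w) →
      (∀ c, c < w → ((active.getD c false = true) ↔ c ∈ fr)) →
      (rows.foldl (fun st rowS => pvRowB w rowS.toList st) (s, fr)).1
        = (rows.foldl (pvDenseRow w) (s, active)).1 := by
  intro rows
  induction rows with
  | nil => intro fr active s _ _; rfl
  | cons rowS rest ih =>
    intro fr active s hb hinv
    simp only [List.foldl_cons]
    set row := rowS.toList with hrow
    obtain ⟨h1, h2⟩ := pvFold_char row w fr [] s []
    set res := fr.foldl (pvStepB row w) ([], s, []) with hres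
    have hrowB : pvRowB w row (s, fr) = (res.2.1, res.2.2) := rfl
    -- the '^'-hit counts agree
    have hhit : res.2.1 = s + (((List.range w).filter
        (fun c => active.getD c false && (pvAt row c == '^'))).length : Int) := by
      rw [h1]
      congr 2
      have hnd : ((List.range w).filter
          (fun c => active.getD c false && (pvAt row c == '^'))).Nodup :=
        (List.nodup_range).filter _
      rw [← List.toFinset_card_of_nodup hnd]
      congr 1
      ext x
      simp only [List.mem_toFinset, List.mem_filter, List.mem_range, Finset.mem_filter,
        Finset.mem_sdiff, List.toFinset_nil, Finset.notMem_empty, not_false_iff, and_true,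
        Bool.and_eq_true, beq_iff_eq]
      constructor
      · rintro ⟨hx, hh⟩
        have hxw : x < w := hb x hx
        exact ⟨hxw, (hinv x hxw).mpr hx, hh⟩
      · rintro ⟨hxw, ha, hh⟩
        exact ⟨(hinv x hxw).mp ha, hh⟩
    -- the produced frontiers agree as sets with the dense nxt vector
    set nxt := (List.range w).map (fun c =>
        (active.getD c false && !(pvAt row c == '^'))
        || (decide (c + 1 < w) && active.getD (c + 1) false && (pvAt row (c + 1) == '^'))
        || (decide (1 ≤ c) && active.getD (c - 1) false && (pvAt row (c - 1) == '^'))) with hnxt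
    have hdense : pvDenseRow w (s, active) rowS = (res.2.1, nxt) := by
      rw [pvDenseRow, ← hrow, ← hnxt, ← hhit]
    have hb' : ∀ x ∈ res.2.2, x < w :=
      pvStepB_out_lt row w fr ([], s, []) hb (by simp)
    have hinv' : ∀ c, c < w → ((nxt.getD c false = true) ↔ c ∈ res.2.2) := by
      intro c hc
      rw [hnxt, pvGetD_map_range _ _ _ hc]
      rw [h2 c]
      simp only [List.not_mem_nil, false_or, List.mem_nil_iff, not_false_iff, true_and,
        Bool.or_eq_true, Bool.and_eq_true, beq_iff_eq, Bool.not_eq_true', decide_eq_true_iff,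
        beq_eq_false_iff_ne, ne_eq]
      constructor
      · rintro ((⟨ha, hh⟩ | ⟨⟨hw1, ha⟩, hh⟩) | ⟨⟨hw1, ha⟩, hh⟩)
        · refine ⟨c, (hinv c hc).mp ha, ?_⟩
          rw [pvSucc, if_neg (by simpa using hh)]
        · refine ⟨c + 1, (hinv (c + 1) hw1).mp ha, ?_⟩
          rw [pvSucc, if_pos hh]
          exact Or.inl ⟨by omega, by omega⟩
        · have hlt : c - 1 < w := by omega
          refine ⟨c - 1, (hinv (c - 1) hlt).mp ha, ?_⟩
          rw [pvSucc, if_pos hh]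
          exact Or.inr ⟨by omega, by omega⟩
      · rintro ⟨c', hc', hs⟩
        have hc'w : c' < w := hb c' hc'
        rw [pvSucc] at hs
        by_cases hh : pvAt row c' = '^'
        · rw [if_pos hh] at hs
          rcases hs with ⟨h0, rfl⟩ | ⟨h1, rfl⟩
          · refine Or.inl (Or.inr ⟨⟨by omega, ?_⟩, by rwa [(by omega : c' - 1 + 1 = c')]⟩)
            rw [(by omega : c' - 1 + 1 = c')]
            exact (hinv c' hc'w).mpr hc'
          · refine Or.inr ⟨⟨by omega, ?_⟩, by rwa [(by omega : c' + 1 - 1 = c')]⟩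
            rw [(by omega : c' + 1 - 1 = c')]
            exact (hinv c' hc'w).mpr hc'
        · rw [if_neg hh] at hs
          rw [hs]
          exact Or.inl (Or.inl ⟨(hinv c' hc'w).mpr hc', by simpa using hh⟩)
    rw [hrowB, hdense]
    exact ih res.2.2 nxt res.2.1 hb' hinv'

-- ===== VERDICT (by name: the statement is the Claim_ definition above) =====
theorem solve_classical_spec : Claim_equal_solve_classical := by
  intro text _
  unfold Spec_solve_classical solve_classical solve_classical_alt
  by_cases hnil : PySem.Str.splitlines text = []
  · simp [hnil]
  · simp only [if_neg hnil]
    set lines := PySem.Str.splitlines text with hlines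
    have hmm : (lines.map String.toList).map List.length
        = lines.map (fun l => l.toList.length) := by
      rw [List.map_map]; rfl
    set w := (PySem.List.max? (lines.map (fun l => l.toList.length)) (fun x => x)).getD 0 with hw
    have hmaps : (lines.map String.toList).map (fun row => row ++ List.replicate (w - row.length) ' ')
        = lines.map (fun l => l.toList ++ List.replicate (w - l.toList.length) ' ') := by
      rw [List.map_map]; rfl
    rw [hmm, hmaps]
    rw [pvFindS_pad w lines 0]
    cases hfind : pvFindSAlt lines 0 with
    | none => simp
    | some p =>
      obtain ⟨sr, sc⟩ := p
      obtain ⟨hsr, l, hl, hsc⟩ := pvFindSAlt_bounds lines 0 sr sc hfind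
      simp only [Nat.zero_add] at hsr
      have hlenmap : (lines.map String.toList).length = lines.length := by
        simp
      rw [hlenmap]
      set h := lines.length with hh
      -- sc < w
      have hne : lines.map (fun l => l.toList.length) ≠ [] := by
        simpa using hnil
      have hscw : sc < w := by
        cases hmax : PySem.List.max? (lines.map (fun l => l.toList.length)) (fun x => x) with
        | none =>
          exact absurd ((PySem.List.max?_eq_none_iff _ _).mp hmax) hne
        | some m =>
          have hle := PySem.List.max?_isMax hmax (l.toList.length) (List.mem_map_of_mem hl)
          rw [hw, hmax]
          simp only [Option.getD_some]
          omega
      have hdrv := pvDriver lines h w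
        (lines.map (fun l => l.toList ++ List.replicate (w - l.toList.length) ' ')) hh rfl
        (h - (sr + 1)) sr [sc] (List.replicate h (List.replicate w false)) 0 (2 * h * w + 1)
        (by omega) (by simp)
        (by intro j hj1 hj2; exact List.getD_replicate _ hj2)
        (by intro c hc; simp at hc; omega)
        (by have h1 : h - (sr + 1) ≤ h := by omega
            have h2 : 2 * w * (h - (sr + 1)) ≤ 2 * w * h := Nat.mul_le_mul_left _ h1
            have h3 : 2 * w * h = 2 * h * w := by ring
            simp only [List.length_cons, List.length_nil]
            omega)
    -- convert the range' fold to the drop fold, then to the dense fold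
      rw [pvFoldl_range'_getD (fun acc rowS => pvRowB w rowS.toList acc) lines
        (h - (sr + 1)) (sr + 1) ((0 : Int), [sc]) (by omega)] at hdrv
      have hbridge := pvSparseDense w (lines.drop (sr + 1)) [sc]
        ((List.range w).map (fun c => decide (c = sc))) 0
        (by intro c hc; simp at hc; omega)
        (by intro c hc
            rw [pvGetD_map_range _ _ _ hc]
            simp)
      simpa [hbridge] using hdrv
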